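-- pv_equiv track=rewrite | github.com/tristan-mcinnis/voice-agent | server/processors/session_log.py | _leaves
-- ===== SOURCE A (Python) =====
-- def _leaves(chunks: list[str]) -> list[str]:
--     """Return chunks not strictly extended by any other chunk in the list.
--
--     Pipecat emits a mix of per-token deltas AND per-sentence cumulative
--     snapshots as ``TextFrame``s. Collect every chunk, then keep only the
--     "leaves" — chunks that no other chunk extends as a longer prefix. This
--     collapses each cumulative snapshot stream down to its final form while
--     preserving distinct sentences.
--     """
--     out: list[str] = []
--     for i, c in enumerate(chunks):
--         extended = any(
--             j != i and other != c and other.startswith(c)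
--             for j, other in enumerate(chunks)
--         )
--         if not extended:
--             out.append(c)
--     # De-dupe identical chunks while preserving order.
--     seen: set[str] = set()
--     unique: list[str] = []
--     for c in out:
--         if c not in seen:
--             seen.add(c)
--             unique.append(c)
--     return unique
-- ===== SOURCE B (Python) =====
-- def _leaves(chunks: list[str]) -> list[str]:
--     """Sort the distinct chunks: a chunk is strictly prefix-extended by some
--     other chunk iff its immediate successor in sorted order extends it, so one
--     adjacent-pair scan replaces the all-pairs scan."""
--     uniq = list(dict.fromkeys(chunks))
--     s = sorted(uniq)
--     extended = set()
--     for k in range(len(s) - 1):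
--         if s[k + 1].startswith(s[k]):
--             extended.add(s[k])
--     return [c for c in uniq if c not in extended]
-- ===== Notes on version B (the rewrite author's own statement) =====
-- stated objective: faster
-- what changed: Instead of testing every chunk against every other chunk for prefix extension (all-pairs scan), B dedups the chunks, sorts the distinct ones, and marks a chunk as extended iff its immediate successor in sorted order starts with it, since any lexicographic string between a chunk and one of its extensions also extends it.
import Mathlib
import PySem

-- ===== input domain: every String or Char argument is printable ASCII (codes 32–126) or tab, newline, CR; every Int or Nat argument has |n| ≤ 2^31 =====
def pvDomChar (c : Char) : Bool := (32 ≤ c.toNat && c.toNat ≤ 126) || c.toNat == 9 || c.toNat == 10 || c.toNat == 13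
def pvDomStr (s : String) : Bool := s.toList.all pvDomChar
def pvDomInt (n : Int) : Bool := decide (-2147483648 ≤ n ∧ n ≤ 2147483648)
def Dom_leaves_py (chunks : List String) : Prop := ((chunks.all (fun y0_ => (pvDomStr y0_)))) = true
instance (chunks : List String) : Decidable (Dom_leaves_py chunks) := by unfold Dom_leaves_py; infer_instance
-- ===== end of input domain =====

-- B replaces A's all-pairs prefix scan by sorting the distinct chunks and testing only
-- adjacent sorted pairs (objective: faster).

-- ===== PORT A =====
def leaves_py (chunks : List String) : List String :=
  let out := (PySem.List.enumerate chunks).foldl (fun out ic =>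
    let extended := (PySem.List.enumerate chunks).any (fun jo =>
      decide (jo.1 ≠ ic.1) && decide (jo.2 ≠ ic.2) && PySem.Str.startswith jo.2 ic.2)
    if !extended then out ++ [ic.2] else out) []
  let su := out.foldl (fun su c =>
    if su.1.contains c then su else (PySem.Set.add su.1 c, su.2 ++ [c]))
    ((PySem.Set.empty : PySem.Set String), ([] : List String))
  su.2

-- ===== PORT B =====
def leaves_py_alt (chunks : List String) : List String :=
  let uniq := PySem.List.dedup chunks
  let s := PySem.List.sorted uniq (fun x => x) false
  let extended := (PySem.List.pyRange 0 ((s.length : Int) - 1) 1).foldl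
    (fun e k =>
      if PySem.Str.startswith (PySem.List.pyGetD s (k + 1) "") (PySem.List.pyGetD s k "")
      then PySem.Set.add e (PySem.List.pyGetD s k "") else e)
    (PySem.Set.empty : PySem.Set String)
  uniq.filter (fun c => !(PySem.Set.contains extended c))

-- ===== PRECONDITION & SPEC =====
def Spec_leaves_py (chunks : List String) (out : List String) : Prop := out = leaves_py_alt chunks
instance (chunks : List String) (out : List String) : Decidable (Spec_leaves_py chunks out) := by unfold Spec_leaves_py; infer_instance

-- ===== CLAIM (what is proved, stated in full; the proofs are below) =====
def Claim_equal_leaves_py : Prop := ∀ (chunks : List String), Dom_leaves_py chunks → Spec_leaves_py chunks (leaves_py chunks)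

-- ===== LEMMAS AND PROOFS =====

-- "c is strictly prefix-extended by some chunk in the list"
def pvExt (chunks : List String) (c : String) : Bool :=
  chunks.any (fun d => decide (d ≠ c) && PySem.Str.startswith d c)

-- A proper prefix is lexicographically smaller.
theorem pvLex_of_proper_prefix (c d : List Char) (hp : c <+: d) (hne : c ≠ d) :
    List.Lex (· < ·) c d := by
  induction c generalizing d with
  | nil =>
    cases d with
    | nil => exact absurd rfl hne
    | cons a t => exact List.Lex.nil
  | cons a c' ih =>
    obtain ⟨t, rfl⟩ := hp
    cases t with
    | nil => simp at hne
    | cons b t' =>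
      exact List.Lex.cons (ih _ ⟨b :: t', rfl⟩ (by simp))

-- Betweenness: anything lexicographically between c and an extension of c also extends c.
theorem pvPrefix_of_between (c x d : List Char)
    (h1 : List.Lex (· < ·) c x) (h2 : List.Lex (· < ·) x d ∨ x = d) (hp : c <+: d) :
    c <+: x := by
  induction c generalizing x d with
  | nil => exact List.nil_prefix
  | cons a c' ih =>
    obtain ⟨t, rfl⟩ := hp
    cases h1 with
    | rel hab =>
      rename_i b x'
      -- x = b :: x' with a < b; but x ≤ a :: …, contradiction
      exfalso
      rcases h2 with h2 | h2
      · cases h2 with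
        | rel hba => exact absurd (lt_trans hab hba) (lt_irrefl a)
        | cons h => exact absurd hab (lt_irrefl a)
      · cases h2; exact absurd hab (lt_irrefl a)
    | @cons _ _ x' h1' =>
      have hx' : c' <+: x' := by
        rcases h2 with h2 | h2
        · cases h2 with
          | rel hba => exact absurd hba (lt_irrefl a)
          | cons h2' => exact ih x' _ h1' (Or.inl h2') ⟨t, rfl⟩
        · cases h2
          exact ih _ _ h1' (Or.inr rfl) ⟨t, rfl⟩
      exact ⟨hx'.choose, by rw [List.cons_append, hx'.choose_spec]⟩

-- A's inner 'any' over enumerate equals pvExt at each admitted position.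
theorem pvInnerAny (chunks : List String) (i : Int) (c : String)
    (hm : (i, c) ∈ PySem.List.enumerate chunks 0) :
    ((PySem.List.enumerate chunks 0).any (fun jo =>
      decide (jo.1 ≠ i) && decide (jo.2 ≠ c) && PySem.Str.startswith jo.2 c)) = pvExt chunks c := by
  rw [PySem.List.mem_enumerate_iff] at hm
  obtain ⟨ki, hki, hic⟩ := hm
  rw [Prod.mk.injEq] at hic
  obtain ⟨hic1, hic2⟩ := hic
  rw [Bool.eq_iff_iff]
  simp only [pvExt, List.any_eq_true, Bool.and_eq_true, decide_eq_true_eq]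
  constructor
  · rintro ⟨jo, hjo, ⟨hj1, hj2⟩, hj3⟩
    rw [PySem.List.mem_enumerate_iff] at hjo
    obtain ⟨k, hk, rfl⟩ := hjo
    exact ⟨chunks[k], List.getElem_mem hk, hj2, hj3⟩
  · rintro ⟨d, hd, hne, hsw⟩
    obtain ⟨k, hk, hdk⟩ := List.mem_iff_getElem.1 hd
    refine ⟨(0 + (k : Int), chunks[k]), (PySem.List.mem_enumerate_iff _ _ _).2 ⟨k, hk, rfl⟩, ⟨?_, ?_⟩, ?_⟩
    · intro he
      have hkki : k = ki := by omega
      exact hne (by subst hkki; rw [← hdk]; exact hic2.symm)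
    · rw [hdk]; exact hne
    · rw [hdk]; exact hsw

-- A's first loop is a filter.
theorem pvFoldlEnum (f : Int × String → Bool) (g : String → Bool) :
    ∀ (l : List String) (s : Int) (acc : List String),
    (∀ p ∈ PySem.List.enumerate l s, f p = g p.2) →
    (PySem.List.enumerate l s).foldl (fun out p => if !(f p) then out ++ [p.2] else out) acc
      = acc ++ l.filter (fun c => !(g c))
  | [], s, acc, _ => by simp [PySem.List.enumerate_nil]
  | x :: xs, s, acc, h => by
    rw [PySem.List.enumerate_cons]
    simp only [List.foldl_cons]
    have hx := h (s, x) (by rw [PySem.List.enumerate_cons]; exact List.mem_cons_self ..)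
    rw [pvFoldlEnum f g xs (s + 1) _
      (fun p hp => h p (by rw [PySem.List.enumerate_cons]; exact List.mem_cons_of_mem _ hp))]
    by_cases hg : g x
    · simp [hx, hg]
    · simp [hx, hg]

-- A's second loop: 'seen' and 'unique' coincide, and the pair computes ordered dedup.
theorem pvFoldlDedup (l : List String) (s : PySem.Set String) :
    l.foldl (fun su c => if su.1.contains c then su else (PySem.Set.add su.1 c, su.2 ++ [c])) (s, s)
      = (l.foldl PySem.Set.add s, l.foldl PySem.Set.add s) := by
  induction l generalizing s with
  | nil => rfl
  | cons x xs ih =>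
    simp only [List.foldl_cons]
    have hstep : (if (s : PySem.Set String).contains x then (s, s)
        else (PySem.Set.add s x, s ++ [x])) = (PySem.Set.add s x, PySem.Set.add s x) := by
      by_cases h : x ∈ s
      · simp [PySem.Set.add, h]
      · simp [PySem.Set.add, h]
    rw [hstep, ih]

-- filter commutes with the Set.add fold (hence with ordered dedup).
theorem pvAddFilter (p : String → Bool) (s : PySem.Set String) (x : String) :
    (PySem.Set.add s x).filter p = if p x then PySem.Set.add (List.filter p s) x else List.filter p s := by
  by_cases hx : x ∈ s
  · by_cases hp : p x
    · have hx2 : x ∈ List.filter p s := List.mem_filter.2 ⟨hx, hp⟩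
      simp [PySem.Set.add, hx, hp, hx2]
    · simp [PySem.Set.add, hx, hp]
  · have hx2 : x ∉ List.filter p s := fun hh => hx (List.mem_filter.1 hh).1
    by_cases hp : p x
    · simp [PySem.Set.add, hx, hp, hx2, List.filter_append]
    · simp [PySem.Set.add, hx, hp, List.filter_append]

theorem pvFoldlAddFilter (p : String → Bool) :
    ∀ (xs : List String) (s : PySem.Set String),
    (xs.foldl PySem.Set.add s).filter p = (xs.filter p).foldl PySem.Set.add (List.filter p s)
  | [], s => rfl
  | x :: xs, s => by
    simp only [List.foldl_cons, List.filter_cons]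
    rw [pvFoldlAddFilter p xs (PySem.Set.add s x), pvAddFilter]
    by_cases hp : p x
    · simp [hp]
    · simp [hp]

-- Membership in B's 'extended' fold.
theorem pvMemFoldE (s : List String) (ks : List Int) (e : PySem.Set String) (c : String) :
    (c ∈ ks.foldl (fun e k =>
        if PySem.Str.startswith (PySem.List.pyGetD s (k + 1) "") (PySem.List.pyGetD s k "")
        then PySem.Set.add e (PySem.List.pyGetD s k "") else e) e)
      ↔ c ∈ e ∨ ∃ k ∈ ks,
          PySem.Str.startswith (PySem.List.pyGetD s (k + 1) "") (PySem.List.pyGetD s k "") = true ∧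
          c = PySem.List.pyGetD s k "" := by
  induction ks generalizing e with
  | nil => simp
  | cons k ks ih =>
    simp only [List.foldl_cons]
    by_cases h : PySem.Str.startswith (PySem.List.pyGetD s (k + 1) "") (PySem.List.pyGetD s k "")
    · rw [if_pos h, ih]
      simp only [PySem.Set.mem_add, List.mem_cons]
      constructor
      · rintro (( hce | rfl) | ⟨k', hk', h1, h2⟩)
        · exact Or.inl hce
        · exact Or.inr ⟨k, Or.inl rfl, h, rfl⟩
        · exact Or.inr ⟨k', Or.inr hk', h1, h2⟩
      · rintro (hce | ⟨k', (rfl | hk'), h1, h2⟩)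
        · exact Or.inl (Or.inl hce)
        · exact Or.inl (Or.inr h2)
        · exact Or.inr ⟨k', hk', h1, h2⟩
    · rw [if_neg h, ih]
      constructor
      · rintro (hce | ⟨k', hk', h1, h2⟩)
        · exact Or.inl hce
        · exact Or.inr ⟨k', List.mem_cons_of_mem _ hk', h1, h2⟩
      · rintro (hce | ⟨k', hk', h1, h2⟩)
        · exact Or.inl hce
        · rcases List.mem_cons.1 hk' with rfl | hk''
          · exact absurd h1 (by simpa using h)
          · exact Or.inr ⟨k', hk'', h1, h2⟩

-- String < is Lex < on the character lists.
theorem pvStrLt (a b : String) : a < b ↔ List.Lex (· < ·) a.toList b.toList := by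
  rw [String.lt_iff_toList_lt]
  exact List.lt_iff_lex_lt _ _

-- On a strictly sorted list, "some chunk strictly extends c" is visible at c's successor.
theorem pvSortedChar (s : List String) (hs : s.Pairwise (· < ·)) (c : String) (hc : c ∈ s) :
    (∃ k : Int, (0 ≤ k ∧ k < (s.length : Int) - 1) ∧
        PySem.Str.startswith (PySem.List.pyGetD s (k + 1) "") (PySem.List.pyGetD s k "") = true ∧
        c = PySem.List.pyGetD s k "")
      ↔ ∃ d ∈ s, d ≠ c ∧ PySem.Str.startswith d c = true := by
  have mono := List.pairwise_iff_getElem.1 hs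
  constructor
  · rintro ⟨k, ⟨hk0, hk1⟩, hsw, hceq⟩
    lift k to ℕ using hk0 with kn
    have hkn : kn + 1 < s.length := by omega
    have e1 : PySem.List.pyGetD s (kn : Int) "" = s[kn] := by
      rw [PySem.List.pyGetD_eq_getElem s "" (by omega) (by omega)]
      simp
    have e2 : PySem.List.pyGetD s ((kn : Int) + 1) "" = s[kn + 1] := by
      rw [show ((kn : Int) + 1) = ((kn + 1 : ℕ) : Int) by push_cast; ring]
      rw [PySem.List.pyGetD_eq_getElem s "" (by omega) (by omega)]
      simp
    rw [e1, e2] at hsw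
    rw [e1] at hceq
    subst hceq
    refine ⟨s[kn + 1], List.getElem_mem hkn, ?_, hsw⟩
    exact ne_of_gt (mono kn (kn + 1) (by omega) hkn (by omega))
  · rintro ⟨d, hd, hne, hsw⟩
    obtain ⟨i, hi, rfl⟩ := List.mem_iff_getElem.1 hc
    obtain ⟨j, hj, rfl⟩ := List.mem_iff_getElem.1 hd
    have hpre : (s[i]).toList <+: (s[j]).toList := by
      rw [PySem.Str.startswith_eq, PySem.Chars.startswith_iff] at hsw
      exact hsw
    have hlt : s[i] < s[j] :=
      (pvStrLt _ _).2 (pvLex_of_proper_prefix _ _ hpre (fun he => hne ((String.toList_inj.1 he).symm)))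
    have hij : i < j := by
      rcases lt_trichotomy i j with h | h | h
      · exact h
      · subst h; exact absurd hlt (lt_irrefl _)
      · exact absurd (mono j i hj hi h) (lt_asymm hlt)
    have hi1 : i + 1 < s.length := by omega
    have e1 : PySem.List.pyGetD s (i : Int) "" = s[i] := by
      rw [PySem.List.pyGetD_eq_getElem s "" (by omega) (by omega)]; simp
    have e2 : PySem.List.pyGetD s ((i : Int) + 1) "" = s[i + 1] := by
      rw [show ((i : Int) + 1) = ((i + 1 : ℕ) : Int) by push_cast; ring]
      rw [PySem.List.pyGetD_eq_getElem s "" (by omega) (by omega)]; simp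
    refine ⟨(i : Int), ⟨by omega, by omega⟩, ?_, e1.symm⟩
    rw [e1, e2, PySem.Str.startswith_eq, PySem.Chars.startswith_iff]
    rcases Nat.lt_or_ge (i + 1) j with h | h
    · exact pvPrefix_of_between _ _ _
        ((pvStrLt _ _).1 (mono i (i + 1) hi hi1 (by omega)))
        (Or.inl ((pvStrLt _ _).1 (mono (i + 1) j hi1 hj h))) hpre
    · have hj1 : j = i + 1 := by omega
      subst hj1
      exact hpre

-- pvExt as an existential.
theorem pvExt_iff (chunks : List String) (c : String) :
    pvExt chunks c = true ↔ ∃ d ∈ chunks, d ≠ c ∧ PySem.Str.startswith d c = true := by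
  simp [pvExt, List.any_eq_true]

-- A computes the pvExt-filter of the ordered dedup.
theorem pvA_eq (chunks : List String) :
    leaves_py chunks = (PySem.List.dedup chunks).filter (fun c => !(pvExt chunks c)) := by
  unfold leaves_py
  rw [pvFoldlEnum
      (fun ic => (PySem.List.enumerate chunks 0).any (fun jo =>
        decide (jo.1 ≠ ic.1) && decide (jo.2 ≠ ic.2) && PySem.Str.startswith jo.2 ic.2))
      (fun c => pvExt chunks c) chunks 0 []
      (fun p hp => pvInnerAny chunks p.1 p.2 hp)]
  rw [List.nil_append]
  show (List.foldl (fun su c => if su.1.contains c then su else (PySem.Set.add su.1 c, su.2 ++ [c]))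
      (([] : PySem.Set String), ([] : PySem.Set String))
      (List.filter (fun c => !(pvExt chunks c)) chunks)).2
    = List.filter (fun c => !(pvExt chunks c)) (PySem.List.dedup chunks)
  refine (congrArg Prod.snd (pvFoldlDedup _ [])).trans ?_
  rw [PySem.List.dedup_eq_ofList, PySem.Set.ofList]
  rw [show (PySem.Set.empty : PySem.Set String) = ([] : List String) from rfl]
  rw [pvFoldlAddFilter, List.filter_nil]

-- B's filter test agrees with pvExt on every distinct chunk.
theorem pvB_test (chunks : List String) (c : String) (hc : c ∈ PySem.List.dedup chunks) :
    (PySem.Set.contains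
      ((PySem.List.pyRange 0 (((PySem.List.sorted (PySem.List.dedup chunks) (fun x => x) false).length : Int) - 1) 1).foldl
        (fun e k =>
          if PySem.Str.startswith
              (PySem.List.pyGetD (PySem.List.sorted (PySem.List.dedup chunks) (fun x => x) false) (k + 1) "")
              (PySem.List.pyGetD (PySem.List.sorted (PySem.List.dedup chunks) (fun x => x) false) k "")
          then PySem.Set.add e
              (PySem.List.pyGetD (PySem.List.sorted (PySem.List.dedup chunks) (fun x => x) false) k "")
          else e)
        (PySem.Set.empty : PySem.Set String)) c) = pvExt chunks c := by
  set s := PySem.List.sorted (PySem.List.dedup chunks) (fun x => x) false with hsdef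
  have hs : s.Pairwise (· < ·) := by
    rw [hsdef, PySem.List.dedup_eq_ofList]
    exact PySem.List.sorted_ofList_pairwise_lt chunks
  have hcs : c ∈ s := (PySem.List.mem_sorted _ _ _ _).2 hc
  rw [Bool.eq_iff_iff, PySem.Set.contains_iff, pvMemFoldE, pvExt_iff]
  constructor
  · rintro (he | ⟨k, hk, h1, h2⟩)
    · exact absurd he (List.not_mem_nil)
    · rw [PySem.List.mem_pyRange_one] at hk
      obtain ⟨d, hd, hne, hsw⟩ := (pvSortedChar s hs c hcs).1 ⟨k, hk, h1, h2⟩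
      exact ⟨d, (PySem.List.mem_dedup chunks d).1 ((PySem.List.mem_sorted _ _ _ _).1 hd), hne, hsw⟩
  · rintro ⟨d, hd, hne, hsw⟩
    obtain ⟨k, hk, h1, h2⟩ := (pvSortedChar s hs c hcs).2
      ⟨d, (PySem.List.mem_sorted _ _ _ _).2 ((PySem.List.mem_dedup chunks d).2 hd), hne, hsw⟩
    exact Or.inr ⟨k, PySem.List.mem_pyRange_one.2 hk, h1, h2⟩

-- ===== VERDICT (by name: the statement is the Claim_ definition above) =====
theorem leaves_py_spec : Claim_equal_leaves_py := by
  intro chunks _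
  show leaves_py chunks = leaves_py_alt chunks
  rw [pvA_eq]
  unfold leaves_py_alt
  exact (List.filter_congr (fun c hc => by rw [pvB_test chunks c hc])).symm
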